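-- pv_equiv track=rewrite | github.com/chenshenyi/-Index-Evaluation-Analysis-Report-aes-ord | aes_tool/rank.py | _ranking_list_simple
-- ===== SOURCE A (Python) =====
-- from typing import Iterable, Optional, Literal, overload, Tuple
--
-- def _ranking_list_simple(sortedlist: Iterable) -> Tuple[int]:
--     """Return the ranking list of the sorted list.
--
--     Args:
--         sortedlist (Iterable): The sorted list.
--
--     Returns:
--         Tuple[float, int]: The ranking list.
--     """
--
--     rankinglist = []
--     for i in range(len(sortedlist)):
--         if i == 0:
--             rankinglist.append(1)
--         elif sortedlist[i] == sortedlist[i-1]: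
--             rankinglist.append(rankinglist[i-1])
--         else:
--             rankinglist.append(i+1)
--     return tuple(rankinglist)
-- ===== SOURCE B (Python) =====
-- from itertools import groupby
--
--
-- def _ranking_list_simple(sortedlist):
--     rankinglist = []
--     pos = 0
--     for _, grp in groupby(sortedlist):
--         n = sum(1 for _ in grp)
--         rankinglist.extend([pos + 1] * n)
--         pos += n
--     return tuple(rankinglist)
-- ===== Notes on version B (the rewrite author's own statement) =====
-- stated objective: idiomatic
-- what changed: Replaces the per-index compare-to-previous-and-carry-rank loop over range(len(...)) with itertools.groupby over the values: each run of equal values is filled with its start position + 1 in one step.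
import Mathlib
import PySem

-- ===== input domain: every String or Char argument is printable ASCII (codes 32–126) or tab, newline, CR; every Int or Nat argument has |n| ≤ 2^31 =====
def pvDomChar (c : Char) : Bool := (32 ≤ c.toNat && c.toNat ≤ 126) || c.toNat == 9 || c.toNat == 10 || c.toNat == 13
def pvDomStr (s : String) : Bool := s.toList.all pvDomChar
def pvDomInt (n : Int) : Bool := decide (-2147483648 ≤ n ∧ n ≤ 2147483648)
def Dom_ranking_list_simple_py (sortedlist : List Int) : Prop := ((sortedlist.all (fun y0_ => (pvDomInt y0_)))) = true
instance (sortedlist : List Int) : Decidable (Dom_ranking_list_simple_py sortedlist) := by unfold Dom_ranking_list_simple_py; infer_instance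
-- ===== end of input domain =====

-- B replaces A's per-index compare-to-previous-and-carry loop by a run-based
-- (groupby-style) partition that fills each run of equal values with its start
-- position + 1 (objective: more idiomatic; same linear cost).

-- ===== PORT A =====
-- for i in range(len(sortedlist)): if i == 0: append 1
--   elif sortedlist[i] == sortedlist[i-1]: append rankinglist[i-1]  else: append i+1
-- (all indices are in range, so plain getD is exact here)
def ranking_list_simple_py (sortedlist : List Int) : List Int :=
  (List.range sortedlist.length).foldl (fun rankinglist i =>
    if i = 0 then rankinglist ++ [1]
    else if sortedlist.getD i 0 = sortedlist.getD (i-1) 0 then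
      rankinglist ++ [rankinglist.getD (i-1) 0]
    else rankinglist ++ [(i : Int) + 1]) []

-- ===== PORT B =====
-- groupby: each maximal run of equal adjacent values, of length n starting at
-- position pos, contributes [pos+1] * n; pos advances by n.
def rankAltGo (pos : Nat) : List Int → List Int
  | [] => []
  | x :: xs =>
    List.replicate ((xs.takeWhile (· == x)).length + 1) ((pos : Int) + 1) ++
      rankAltGo (pos + (xs.takeWhile (· == x)).length + 1) (xs.dropWhile (· == x))
  termination_by l => l.length
  decreasing_by
    simpa using Nat.lt_succ_of_le (xs.length_dropWhile_le (· == x))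

def ranking_list_simple_py_alt (sortedlist : List Int) : List Int :=
  rankAltGo 0 sortedlist

-- ===== PRECONDITION & SPEC =====
def Spec_ranking_list_simple_py (sortedlist : List Int) (out : List Int) : Prop := out = ranking_list_simple_py_alt sortedlist
instance (sortedlist : List Int) (out : List Int) : Decidable (Spec_ranking_list_simple_py sortedlist out) := by unfold Spec_ranking_list_simple_py; infer_instance

-- ===== CLAIM (what is proved, stated in full; the proofs are below) =====
def Claim_equal_ranking_list_simple_py : Prop := ∀ (sortedlist : List Int), Dom_ranking_list_simple_py sortedlist → Spec_ranking_list_simple_py sortedlist (ranking_list_simple_py sortedlist)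

-- ===== LEMMAS AND PROOFS =====

-- the rank at index i, as a recursive function of the index
def rankAt (s : List Int) : Nat → Int
  | 0 => 1
  | i+1 => if s.getD (i+1) 0 = s.getD i 0 then rankAt s i else (i : Int) + 2

theorem portA_eq_map (s : List Int) (n : Nat) :
    (List.range n).foldl (fun rankinglist i =>
      if i = 0 then rankinglist ++ [1]
      else if s.getD i 0 = s.getD (i-1) 0 then
        rankinglist ++ [rankinglist.getD (i-1) 0]
      else rankinglist ++ [(i : Int) + 1]) []
    = (List.range n).map (rankAt s) := by
  induction n with
  | zero => simp
  | succ n ih =>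
    rw [List.range_succ, List.foldl_append, ih, List.map_append]
    cases n with
    | zero => simp [rankAt]
    | succ m =>
      simp only [List.foldl_cons, List.foldl_nil, List.map_cons, List.map_nil]
      have hget : ((List.range (m+1)).map (rankAt s)).getD m 0 = rankAt s m := by
        rw [List.getD_eq_getElem?_getD, List.getElem?_map]
        simp
      rw [if_neg (Nat.succ_ne_zero m), Nat.add_sub_cancel, hget, rankAt]
      split_ifs with h
      · rfl
      · simp only [List.append_cancel_left_eq, List.cons.injEq, and_true]
        push_cast
        ring

theorem tw_getD (x : Int) : ∀ (xs : List Int) (i : Nat),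
    i < (xs.takeWhile (· == x)).length → xs.getD i 0 = x := by
  intro xs
  induction xs with
  | nil => intro i h; simp at h
  | cons y ys ih =>
    intro i h
    by_cases hy : y = x
    · cases i with
      | zero => simpa using hy
      | succ j =>
        simp [hy] at h
        simpa using ih j h
    · simp [hy] at h

theorem dw_drop (x : Int) : ∀ xs : List Int,
    xs.drop (xs.takeWhile (· == x)).length = xs.dropWhile (· == x) := by
  intro xs
  induction xs with
  | nil => simp
  | cons y ys ih =>
    by_cases hy : y = x
    · simpa [hy] using ih
    · simp [hy]

theorem dw_head_ne (x y : Int) (ys : List Int) : ∀ xs : List Int,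
    xs.dropWhile (· == x) = y :: ys → y ≠ x := by
  intro xs
  induction xs with
  | nil => intro h; simp at h
  | cons z zs ih =>
    intro h
    by_cases hz : z = x
    · exact ih (by simpa [hz] using h)
    · simp [hz] at h
      omega

theorem getD_of_drop (s : List Int) (pos j : Nat) :
    (s.drop pos).getD j 0 = s.getD (pos + j) 0 := by
  simp [List.getD_eq_getElem?_getD, List.getElem?_drop]

-- values of s at offsets 0..run length from pos all equal x
theorem run_val (s : List Int) (pos : Nat) (x : Int) (xs : List Int)
    (hdrop : s.drop pos = x :: xs) :
    ∀ i, i ≤ (xs.takeWhile (· == x)).length → s.getD (pos + i) 0 = x := by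
  intro i hi
  have h := getD_of_drop s pos i
  rw [hdrop] at h
  rw [← h]
  cases i with
  | zero => simp
  | succ i' =>
    simp only [List.getD_cons_succ]
    exact tw_getD x xs i' (Nat.lt_of_succ_le hi)

theorem rankAt_run (s : List Int) (pos : Nat)
    (hstart : rankAt s pos = (pos : Int) + 1)
    (x : Int) (xs : List Int) (hdrop : s.drop pos = x :: xs) :
    ∀ j, j ≤ (xs.takeWhile (· == x)).length → rankAt s (pos + j) = (pos : Int) + 1 := by
  intro j hj
  induction j with
  | zero => simpa using hstart
  | succ k ihk =>
    have hk := ihk (Nat.le_of_succ_le hj)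
    have h1 : s.getD (pos + (k+1)) 0 = x := run_val s pos x xs hdrop (k+1) hj
    have h2 : s.getD (pos + k) 0 = x := run_val s pos x xs hdrop k (Nat.le_of_succ_le hj)
    have he : pos + (k+1) = (pos + k) + 1 := by omega
    rw [he] at h1 ⊢
    rw [rankAt, h1, h2, if_pos rfl, hk]

theorem rankAltGo_eq (s : List Int) : ∀ (n pos : Nat) (l : List Int),
    l.length ≤ n → s.drop pos = l → rankAt s pos = (pos : Int) + 1 →
    rankAltGo pos l = (List.range' pos l.length).map (rankAt s) := by
  intro n
  induction n with
  | zero =>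
    intro pos l hn hdrop _
    have : l = [] := List.eq_nil_of_length_eq_zero (Nat.le_zero.mp hn)
    simp [this, rankAltGo]
  | succ n ih =>
    intro pos l hn hdrop hstart
    cases l with
    | nil => simp [rankAltGo]
    | cons x xs =>
      rw [rankAltGo]
      have hsplit : xs.length + 1 =
          ((xs.takeWhile (· == x)).length + 1) + (xs.dropWhile (· == x)).length := by
        have := List.takeWhile_append_dropWhile (p := (· == x)) (l := xs)
        have hlen : (xs.takeWhile (· == x)).length + (xs.dropWhile (· == x)).length
            = xs.length := by
          rw [← List.length_append, this]
        omega
      have hrange : List.range' pos (x :: xs).length =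
          List.range' pos ((xs.takeWhile (· == x)).length + 1) ++
          List.range' (pos + ((xs.takeWhile (· == x)).length + 1))
            (xs.dropWhile (· == x)).length := by
        rw [List.length_cons, hsplit, List.range'_append_1]
      rw [hrange, List.map_append]
      -- first block: the run is constant pos+1
      have hrun : (List.range' pos ((xs.takeWhile (· == x)).length + 1)).map (rankAt s)
          = List.replicate ((xs.takeWhile (· == x)).length + 1) ((pos : Int) + 1) := by
        rw [List.eq_replicate_iff]
        constructor
        · simp
        · intro b hb
          rcases List.mem_map.mp hb with ⟨i, hi, hbi⟩
          rcases List.mem_range'_1.mp hi with ⟨hle, hlt⟩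
          obtain ⟨j, rfl⟩ : ∃ j, i = pos + j := ⟨i - pos, by omega⟩
          rw [← hbi]
          exact rankAt_run s pos hstart x xs hdrop j (by omega)
      -- tail: recurse
      have hd1 : s.drop (pos + 1) = xs := by
        rw [← List.tail_drop, hdrop]
        rfl
      have hdrop' : s.drop (pos + ((xs.takeWhile (· == x)).length + 1))
          = xs.dropWhile (· == x) := by
        rw [show pos + ((xs.takeWhile (· == x)).length + 1)
            = (pos + 1) + (xs.takeWhile (· == x)).length by omega,
          ← List.drop_drop, hd1, dw_drop]
      have htail : rankAltGo (pos + (xs.takeWhile (· == x)).length + 1)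
            (xs.dropWhile (· == x))
          = (List.range' (pos + ((xs.takeWhile (· == x)).length + 1))
              (xs.dropWhile (· == x)).length).map (rankAt s) := by
        cases hrest : xs.dropWhile (· == x) with
        | nil => simp [rankAltGo]
        | cons y ys =>
          have hlen' : (xs.dropWhile (· == x)).length ≤ n := by
            have := xs.length_dropWhile_le (· == x)
            have hl : (x :: xs).length ≤ n + 1 := hn
            simp at hl
            rw [hrest] at this ⊢
            omega
          have hne : y ≠ x := dw_head_ne x y ys xs hrest
          have hvy : s.getD (pos + ((xs.takeWhile (· == x)).length + 1)) 0 = y := by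
            have h := getD_of_drop s (pos + ((xs.takeWhile (· == x)).length + 1)) 0
            rw [hdrop', hrest] at h
            simpa using h.symm
          have hvx : s.getD (pos + (xs.takeWhile (· == x)).length) 0 = x :=
            run_val s pos x xs hdrop _ (Nat.le_refl _)
          have hstart' : rankAt s (pos + ((xs.takeWhile (· == x)).length + 1))
              = ((pos + ((xs.takeWhile (· == x)).length + 1) : Nat) : Int) + 1 := by
            rw [show pos + ((xs.takeWhile (· == x)).length + 1)
                = (pos + (xs.takeWhile (· == x)).length) + 1 by omega]
            rw [rankAt]
            rw [show (pos + (xs.takeWhile (· == x)).length) + 1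
                = pos + ((xs.takeWhile (· == x)).length + 1) by omega, hvy, hvx]
            rw [if_neg hne]
            push_cast
            ring
          have := ih (pos + ((xs.takeWhile (· == x)).length + 1))
            (xs.dropWhile (· == x)) (by rw [hrest]; rw [hrest] at hlen'; exact hlen')
            hdrop' hstart'
          rw [show pos + (xs.takeWhile (· == x)).length + 1
              = pos + ((xs.takeWhile (· == x)).length + 1) by omega, ← hrest]
          exact this
      rw [hrun, htail]

-- ===== VERDICT (by name: the statement is the Claim_ definition above) =====
theorem ranking_list_simple_py_spec : Claim_equal_ranking_list_simple_py := by
  intro s _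
  show ranking_list_simple_py s = ranking_list_simple_py_alt s
  rw [ranking_list_simple_py, portA_eq_map, ranking_list_simple_py_alt,
      rankAltGo_eq s s.length 0 s (Nat.le_refl _) (by simp) (by simp [rankAt]),
      List.range_eq_range']
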